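-- pv_equiv track=rewrite | github.com/alexanderangelov78/checkio | remove-all-before.py | remove_all_before
-- ===== SOURCE A (Python) =====
-- from typing import Iterable
--
-- def remove_all_before(items: list, border: int) -> Iterable:
--     # your code here
--     Titems = []
--     if border in items:
--         for i in range(items.index(border), len(items)):
--             Titems.append(items[i])
--     else:
--         for i in range(0, len(items)):
--             Titems.append(items[i])
--     return Titems
-- ===== SOURCE B (Python) =====
-- def remove_all_before(items: list, border: int):
--     started = False
--     result = []
--     for x in items:
--         if not started and x == border:
--             started = True
--         if started:
--             result.append(x)
--     return result if started else list(items)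
-- ===== Notes on version B (the rewrite author's own statement) =====
-- stated objective: simpler
-- what changed: Replaces the membership test + .index + index-based copy loops (multiple scans) with one forward pass that flips a 'started' flag at the first occurrence of border and appends from there, falling back to a copy of the whole list if the flag never flips.
import Mathlib
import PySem

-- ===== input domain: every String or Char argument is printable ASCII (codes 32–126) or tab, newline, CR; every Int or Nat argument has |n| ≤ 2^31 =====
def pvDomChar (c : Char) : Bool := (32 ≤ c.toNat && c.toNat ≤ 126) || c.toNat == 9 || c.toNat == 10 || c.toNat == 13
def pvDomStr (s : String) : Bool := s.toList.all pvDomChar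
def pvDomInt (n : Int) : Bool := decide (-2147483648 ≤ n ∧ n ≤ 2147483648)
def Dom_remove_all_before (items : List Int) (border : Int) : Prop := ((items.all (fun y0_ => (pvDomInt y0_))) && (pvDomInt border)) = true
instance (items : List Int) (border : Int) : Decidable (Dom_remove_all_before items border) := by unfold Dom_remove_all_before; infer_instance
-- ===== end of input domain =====

-- B replaces A's membership test + .index + copy loops by one forward pass with a 'started' flag (simpler decomposition).


-- ===== PORT A =====
def remove_all_before (items : List Int) (border : Int) : List Int :=
  let Titems : List Int := []
  if items.contains border then
    (PySem.List.pyRange (((PySem.List.index? items border).getD 0 : Nat) : Int) (items.length : Int) 1).foldl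
      (fun acc i => acc ++ [PySem.List.pyGetD items i 0]) Titems
  else
    (PySem.List.pyRange 0 (items.length : Int) 1).foldl
      (fun acc i => acc ++ [PySem.List.pyGetD items i 0]) Titems

-- ===== PORT B =====
-- loop body of B's single pass: flip 'started' at the first border, append once started
def pvStepB (border : Int) (st : Bool × List Int) (x : Int) : Bool × List Int :=
  let started := st.1 || decide (x = border)
  if started then (true, st.2 ++ [x]) else (false, st.2)

def remove_all_before_alt (items : List Int) (border : Int) : List Int :=
  let st := items.foldl (pvStepB border) (false, ([] : List Int))
  if st.1 then st.2 else items

-- ===== PRECONDITION & SPEC =====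
def Spec_remove_all_before (items : List Int) (border : Int) (out : List Int) : Prop := out = remove_all_before_alt items border
instance (items : List Int) (border : Int) (out : List Int) : Decidable (Spec_remove_all_before items border out) := by unfold Spec_remove_all_before; infer_instance

-- ===== CLAIM (what is proved, stated in full; the proofs are below) =====
def Claim_equal_remove_all_before : Prop := ∀ (items : List Int) (border : Int), Dom_remove_all_before items border → Spec_remove_all_before items border (remove_all_before items border)

-- ===== LEMMAS AND PROOFS =====

theorem foldl_snoc (xs : List Int) (init : List Int) :
    xs.foldl (fun acc x => acc ++ [x]) init = init ++ xs := by
  induction xs generalizing init with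
  | nil => simp
  | cons x xs ih => simp [List.foldl_cons, ih]

theorem index?_of_mem (xs : List Int) (v : Int) (h : v ∈ xs) :
    PySem.List.index? xs v = some (xs.idxOf v) := by
  induction xs with
  | nil => cases h
  | cons x xs ih =>
    by_cases hx : x = v
    · subst hx; rw [PySem.List.index?_cons_self]; simp [List.idxOf_cons_self]
    · have hv : v ∈ xs := by
        cases h with
        | head => exact absurd rfl hx
        | tail _ h' => exact h'
      rw [PySem.List.index?_cons_of_ne xs hx, ih hv]
      simp [hx]

theorem portA_char (items : List Int) (border : Int) :
    remove_all_before items border =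
      if items.contains border then items.drop (items.idxOf border) else items := by
  unfold remove_all_before
  by_cases h : items.contains border
  · have hm : border ∈ items := by simpa using h
    rw [if_pos h, if_pos h, index?_of_mem items border hm]
    simp only [Option.getD_some]
    rw [PySem.List.foldl_pyRange_pyGetD' items 0 (fun acc x => acc ++ [x]) []
      (Int.natCast_nonneg _), foldl_snoc, List.nil_append]
    simp
  · rw [if_neg h, if_neg h]
    rw [PySem.List.foldl_pyRange_pyGetD' items 0 (fun acc x => acc ++ [x]) [] le_rfl,
      foldl_snoc, List.nil_append]
    simp

theorem stepB_true (border : Int) (acc : List Int) (x : Int) :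
    pvStepB border (true, acc) x = (true, acc ++ [x]) := by
  simp [pvStepB]

theorem stepB_hit (border : Int) (acc : List Int) :
    pvStepB border (false, acc) border = (true, acc ++ [border]) := by
  simp [pvStepB]

theorem stepB_miss (border : Int) (acc : List Int) (x : Int) (hx : x ≠ border) :
    pvStepB border (false, acc) x = (false, acc) := by
  simp [pvStepB, hx]

theorem foldB_true (xs acc : List Int) (border : Int) :
    xs.foldl (pvStepB border) (true, acc) = (true, acc ++ xs) := by
  induction xs generalizing acc with
  | nil => simp
  | cons x xs ih =>
    rw [List.foldl_cons, stepB_true, ih]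
    simp

theorem foldB_false (xs acc : List Int) (border : Int) :
    xs.foldl (pvStepB border) (false, acc) =
      if border ∈ xs then (true, acc ++ xs.drop (xs.idxOf border)) else (false, acc) := by
  induction xs generalizing acc with
  | nil => simp
  | cons x xs ih =>
    by_cases hx : x = border
    · subst hx
      rw [List.foldl_cons, stepB_hit, foldB_true]
      simp [List.idxOf_cons_self]
    · rw [List.foldl_cons, stepB_miss border acc x hx, ih]
      have hmem : (border ∈ x :: xs) ↔ (border ∈ xs) := by
        constructor
        · intro h
          cases h with
          | head => exact absurd rfl hx
          | tail _ h' => exact h'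
        · exact List.mem_cons_of_mem x
      by_cases hm : border ∈ xs
      · rw [if_pos hm, if_pos (hmem.mpr hm)]
        have hidx : (x :: xs).idxOf border = xs.idxOf border + 1 := by
          simp [hx]
        rw [hidx]
        simp
      · rw [if_neg hm, if_neg (fun h => hm (hmem.mp h))]

theorem portB_char (items : List Int) (border : Int) :
    remove_all_before_alt items border =
      if items.contains border then items.drop (items.idxOf border) else items := by
  simp only [remove_all_before_alt]
  rw [foldB_false]
  by_cases hm : border ∈ items
  · rw [if_pos hm]
    simp [hm]
  · rw [if_neg hm]
    simp [hm]

-- ===== VERDICT (by name: the statement is the Claim_ definition above) =====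
theorem remove_all_before_spec : Claim_equal_remove_all_before := by
  intro items border _
  unfold Spec_remove_all_before
  rw [portA_char, portB_char]
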